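-- pv_equiv track=rewrite | github.com/mrthomasvan-eng/multibox-planner | app/recommender.py | _slot_priority_indices
-- ===== SOURCE A (Python) =====
-- from typing import Dict, List, Optional, Tuple, Set, Any
--
-- def _slot_priority_indices(template_slots: List[str]) -> List[int]:
--     order = [
--         "kiter_swarm",
--         "kiter_fear_snare",
--         "kiter",
--         "pet_tank",
--         "charm_tank",
--         "tank",
--         "healer",
--         "slow",
--         "cc",
--         "dps",
--         "pet_partner",
--         "charm_partner",
--         "kite_partner_swarm",
--         "kite_partner_fear_snare",
--         "kite_partner",
--         "support",
--     ]
--     indices: List[int] = []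
--     for slot_name in order:
--         indices.extend([i for i, s in enumerate(template_slots) if s == slot_name])
--     indices.extend([i for i, s in enumerate(template_slots) if s not in order])
--     return indices
-- ===== SOURCE B (Python) =====
-- from typing import Dict, List
--
-- def _slot_priority_indices(template_slots: List[str]) -> List[int]:
--     order = [
--         "kiter_swarm",
--         "kiter_fear_snare",
--         "kiter",
--         "pet_tank",
--         "charm_tank",
--         "tank",
--         "healer",
--         "slow",
--         "cc",
--         "dps",
--         "pet_partner",
--         "charm_partner",
--         "kite_partner_swarm",
--         "kite_partner_fear_snare",
--         "kite_partner",
--         "support",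
--     ]
--     rank = {name: j for j, name in enumerate(order)}
--     buckets: Dict[int, List[int]] = {}
--     for i, s in enumerate(template_slots):
--         buckets.setdefault(rank.get(s, len(order)), []).append(i)
--     return [i for j in range(len(order) + 1) for i in buckets.get(j, [])]
-- ===== Notes on version B (the rewrite author's own statement) =====
-- stated objective: faster
-- what changed: A makes one scanning pass over template_slots per priority name (16 passes) plus a final unlisted-names pass with a linear 'in order' test each; B builds a name-to-rank dict once, groups the indices into rank buckets in a single pass, and concatenates the buckets in rank order.
import Mathlib
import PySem

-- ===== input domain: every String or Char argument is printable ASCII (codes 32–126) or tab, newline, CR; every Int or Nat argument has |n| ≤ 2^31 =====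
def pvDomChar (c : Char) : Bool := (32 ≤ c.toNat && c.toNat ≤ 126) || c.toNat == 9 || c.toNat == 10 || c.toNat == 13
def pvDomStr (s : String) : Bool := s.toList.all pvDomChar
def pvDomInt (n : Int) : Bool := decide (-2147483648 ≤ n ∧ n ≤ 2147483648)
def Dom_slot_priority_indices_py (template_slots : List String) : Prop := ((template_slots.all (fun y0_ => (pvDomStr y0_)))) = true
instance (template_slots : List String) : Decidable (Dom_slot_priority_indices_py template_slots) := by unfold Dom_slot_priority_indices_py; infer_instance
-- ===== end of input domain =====

-- B replaces A's 17 scanning passes over the slot list by one grouping pass into rank buckets (a dict) driven by a precomputed name→rank table; objective: alternative single-pass algorithm.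


-- the priority list shared (as source text) by both Pythons
def pvOrder : List String :=
  ["kiter_swarm", "kiter_fear_snare", "kiter", "pet_tank", "charm_tank", "tank",
   "healer", "slow", "cc", "dps", "pet_partner", "charm_partner",
   "kite_partner_swarm", "kite_partner_fear_snare", "kite_partner", "support"]

-- ===== PORT A =====
def slot_priority_indices_py (template_slots : List String) : List Int :=
  (pvOrder.foldl
    (fun acc slot_name =>
      acc ++ ((PySem.List.enumerate template_slots 0).filter (fun p => p.2 == slot_name)).map (fun p => p.1))
    [])
  ++ ((PySem.List.enumerate template_slots 0).filter (fun p => !pvOrder.contains p.2)).map (fun p => p.1)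

-- ===== PORT B =====
-- rank = {name: j for j, name in enumerate(order)}
def pvRank : PySem.Dict String Int :=
  (PySem.List.enumerate pvOrder 0).foldl (fun d p => d.insert p.2 p.1) PySem.Dict.empty

def slot_priority_indices_py_alt (template_slots : List String) : List Int :=
  (PySem.List.pyRange 0 ((pvOrder.length : Int) + 1) 1).flatMap
    (fun j =>
      ((PySem.List.enumerate template_slots 0).foldl
        (fun d p => d.modify (pvRank.getD p.2 (pvOrder.length : Int)) [] (· ++ [p.1]))
        PySem.Dict.empty).getD j [])

-- ===== PRECONDITION & SPEC =====
def Spec_slot_priority_indices_py (template_slots : List String) (out : List Int) : Prop := out = slot_priority_indices_py_alt template_slots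
instance (template_slots : List String) (out : List Int) : Decidable (Spec_slot_priority_indices_py template_slots out) := by unfold Spec_slot_priority_indices_py; infer_instance

-- ===== CLAIM (what is proved, stated in full; the proofs are below) =====
def Claim_equal_slot_priority_indices_py : Prop := ∀ (template_slots : List String), Dom_slot_priority_indices_py template_slots → Spec_slot_priority_indices_py template_slots (slot_priority_indices_py template_slots)

-- ===== LEMMAS AND PROOFS =====

-- first-match association lookup with default: the value `pvRank.getD s 16` computes
def pvLookupD (l : List (String × Int)) (s : String) (d : Int) : Int :=
  ((l.find? (fun p => p.1 == s)).map (·.2)).getD d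

-- the concrete association list underlying pvRank
def pvAssoc : List (String × Int) :=
  [("kiter_swarm", 0), ("kiter_fear_snare", 1), ("kiter", 2), ("pet_tank", 3),
   ("charm_tank", 4), ("tank", 5), ("healer", 6), ("slow", 7), ("cc", 8), ("dps", 9),
   ("pet_partner", 10), ("charm_partner", 11), ("kite_partner_swarm", 12),
   ("kite_partner_fear_snare", 13), ("kite_partner", 14), ("support", 15)]

lemma pvRank_items : pvRank.items = pvAssoc := by rfl

lemma pvRank_getD (s : String) : pvRank.getD s 16 = pvLookupD pvAssoc s 16 := by
  simp only [PySem.Dict.getD, PySem.Dict.get?, pvRank_items, pvLookupD]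

lemma pvLookupD_ne (l : List (String × Int)) (s : String) (d j : Int)
    (h : ∀ p ∈ l, p.1 = s → p.2 ≠ j) (hd : d ≠ j) : pvLookupD l s d ≠ j := by
  induction l with
  | nil => simpa [pvLookupD] using hd
  | cons a l ih =>
    by_cases ha : a.1 = s
    · have hb : (a.1 == s) = true := by simp [ha]
      simpa [pvLookupD, List.find?, hb] using h a (by simp) ha
    · have hb : (a.1 == s) = false := by simp [ha]
      have := ih (fun p hp => h p (by simp [hp]))
      simpa [pvLookupD, List.find?, hb] using this

lemma pvLookupD_not_mem (l : List (String × Int)) (s : String) (d : Int)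
    (h : ∀ p ∈ l, p.1 ≠ s) : pvLookupD l s d = d := by
  induction l with
  | nil => rfl
  | cons a l ih =>
    have hb : (a.1 == s) = false := by simp [h a (by simp)]
    simpa [pvLookupD, List.find?, hb] using ih (fun p hp => h p (by simp [hp]))

lemma pvLookupD_mem_values (l : List (String × Int)) (s : String) (d : Int)
    (h : s ∈ l.map (·.1)) : pvLookupD l s d ∈ l.map (·.2) := by
  induction l with
  | nil => simp at h
  | cons a l ih =>
    by_cases ha : a.1 = s
    · have hb : (a.1 == s) = true := by simp [ha]
      simp [pvLookupD, List.find?, hb]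
    · have hm : s ∈ l.map (·.1) := by
        rcases List.mem_map.mp h with ⟨p, hp, hps⟩
        rcases List.mem_cons.mp hp with h1 | h1
        · exact absurd (h1 ▸ hps) ha
        · exact List.mem_map.mpr ⟨p, h1, hps⟩
      have hb : (a.1 == s) = false := by simp [ha]
      simp only [pvLookupD, List.find?, hb, List.map_cons, List.mem_cons]
      right
      simpa [pvLookupD] using ih hm

lemma pvLookupD_mem_pair (l : List (String × Int)) (name : String) (j d : Int)
    (hnd : (l.map (·.1)).Nodup) (hm : (name, j) ∈ l) : pvLookupD l name d = j := by
  induction l with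
  | nil => simp at hm
  | cons a l ih =>
    rw [List.map_cons, List.nodup_cons] at hnd
    rcases List.mem_cons.mp hm with h1 | h1
    · simp [pvLookupD, List.find?, ← h1]
    · have ha : a.1 ≠ name := by
        intro hco
        exact hnd.1 (hco ▸ List.mem_map.mpr ⟨(name, j), h1, rfl⟩)
      have hb : (a.1 == name) = false := by simp [ha]
      simpa [pvLookupD, List.find?, hb] using ih hnd.2 h1

-- pointwise: testing rank = j is testing equality with the name of rank j
lemma pv_pw_listed (j : Int) (name : String) (hmem : (name, j) ∈ pvAssoc) (s : String) :
    (pvRank.getD s 16 == j) = (s == name) := by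
  rw [pvRank_getD]
  by_cases h : s = name
  · subst h
    have hv : pvLookupD pvAssoc s 16 = j := pvLookupD_mem_pair _ _ _ _ (by decide) hmem
    simp [hv]
  · have hne : pvLookupD pvAssoc s 16 ≠ j := by
      apply pvLookupD_ne
      · intro p hp hps hpj
        have hinj := List.inj_on_of_nodup_map
          (f := fun q : String × Int => q.2) (l := pvAssoc) (by decide)
        have hpn : p = (name, j) := hinj hp hmem (by simpa using hpj)
        exact h (by rw [← hps, hpn])
      · intro hj
        have : (16 : Int) ∈ pvAssoc.map (·.2) :=
          List.mem_map.mpr ⟨(name, j), hmem, by simpa using hj.symm⟩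
        revert this; decide
    simp [h, hne]

lemma pv_pw_unlisted (s : String) :
    (pvRank.getD s 16 == 16) = (!pvOrder.contains s) := by
  rw [pvRank_getD]
  by_cases hm : s ∈ pvOrder
  · have hk : s ∈ pvAssoc.map (·.1) := by
      rw [show pvAssoc.map (·.1) = pvOrder from by decide]; exact hm
    have hv := pvLookupD_mem_values pvAssoc s 16 hk
    have hne : pvLookupD pvAssoc s 16 ≠ 16 := by
      intro he; rw [he] at hv; revert hv; decide
    simp [hne, hm]
  · have hall : ∀ p ∈ pvAssoc, p.1 ≠ s := by
      intro p hp hps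
      apply hm
      rw [← hps, ← show pvAssoc.map (·.1) = pvOrder from by decide]
      exact List.mem_map_of_mem hp
    rw [pvLookupD_not_mem _ _ _ hall]
    simp [hm]

-- bucket j of B's grouping dict = indices whose rank is j
lemma pv_bucket (template_slots : List String) (j : Int) :
    ((PySem.List.enumerate template_slots 0).foldl
      (fun d p => d.modify (pvRank.getD p.2 (pvOrder.length : Int)) [] (· ++ [p.1]))
      PySem.Dict.empty).getD j []
    = ((PySem.List.enumerate template_slots 0).filter
        (fun p => pvRank.getD p.2 16 == j)).map (fun p => p.1) := by
  rw [show ((pvOrder.length : Int)) = 16 from by decide]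
  have hm1 : ∀ (l : List (Int × String)) (d : PySem.Dict Int (List Int)),
      List.foldl (fun d p => d.modify (pvRank.getD p.2 16) [] (· ++ [p.1])) d l
      = List.foldl (fun d q => d.modify q.1 [] (· ++ [q.2])) d
          (l.map (fun p => (pvRank.getD p.2 16, p.1))) := by
    intro l d; rw [List.foldl_map]
  rw [hm1, PySem.Dict.getD_foldl_modify_append]
  simp [List.filter_map, List.map_map, Function.comp_def]

-- ===== VERDICT (by name: the statement is the Claim_ definition above) =====
theorem slot_priority_indices_py_spec : Claim_equal_slot_priority_indices_py := by
  intro ts _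
  show slot_priority_indices_py ts = slot_priority_indices_py_alt ts
  unfold slot_priority_indices_py slot_priority_indices_py_alt
  rw [PySem.List.foldl_append_eq_flatMap]
  rw [show ((pvOrder.length : Int) + 1) = 17 from by decide]
  rw [show PySem.List.pyRange 0 17 1
        = ([0, 1, 2, 3, 4, 5, 6, 7, 8, 9, 10, 11, 12, 13, 14, 15, 16] : List Int) from by decide]
  simp only [pv_bucket ts]
  have hpw : ∀ (j : Int) (name : String), (name, j) ∈ pvAssoc →
      (PySem.List.enumerate ts 0).filter (fun p => pvRank.getD p.2 16 == j)
        = (PySem.List.enumerate ts 0).filter (fun p => p.2 == name) :=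
    fun j name hmem => List.filter_congr (fun p _ => pv_pw_listed j name hmem p.2)
  have hu : (PySem.List.enumerate ts 0).filter (fun p => pvRank.getD p.2 16 == 16)
      = (PySem.List.enumerate ts 0).filter (fun p => !pvOrder.contains p.2) :=
    List.filter_congr (fun p _ => pv_pw_unlisted p.2)
  simp only [pvOrder] at hu
  simp only [pvOrder, List.flatMap_cons, List.flatMap_nil, List.append_nil, List.nil_append]
  rw [hpw 0 "kiter_swarm" (by decide), hpw 1 "kiter_fear_snare" (by decide),
      hpw 2 "kiter" (by decide), hpw 3 "pet_tank" (by decide),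
      hpw 4 "charm_tank" (by decide), hpw 5 "tank" (by decide),
      hpw 6 "healer" (by decide), hpw 7 "slow" (by decide),
      hpw 8 "cc" (by decide), hpw 9 "dps" (by decide),
      hpw 10 "pet_partner" (by decide), hpw 11 "charm_partner" (by decide),
      hpw 12 "kite_partner_swarm" (by decide), hpw 13 "kite_partner_fear_snare" (by decide),
      hpw 14 "kite_partner" (by decide), hpw 15 "support" (by decide), hu]
  simp only [List.append_assoc]
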